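-- pv_equiv track=rewrite | github.com/weiyangzen/awesome_algorithms | Algorithms/数学-算法-0563-多项式求逆/demo.py | poly_inv_naive_mod
-- ===== SOURCE A (Python) =====
-- from typing import List, Sequence, Tuple
--
-- def normalize_poly(coeffs: Sequence[int], mod: int) -> List[int]:
--     """Map coefficients into [0, mod)."""
--     return [int(c) % mod for c in coeffs]
--
-- def poly_inv_naive_mod(a: Sequence[int], n: int, mod: int) -> List[int]:
--     """Reference O(n^2) inverse via coefficient recurrence."""
--     if n <= 0:
--         return []
--     if not a:
--         raise ValueError("input polynomial must be non-empty")
--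
--     a_norm = normalize_poly(a, mod)
--     if a_norm[0] == 0:
--         raise ValueError("constant term is not invertible modulo mod")
--
--     inv_a0 = pow(a_norm[0], -1, mod)
--     b = [0] * n
--     b[0] = inv_a0
--
--     for k in range(1, n):
--         accum = 0
--         upper = min(k, len(a_norm) - 1)
--         for i in range(1, upper + 1):
--             accum = (accum + a_norm[i] * b[k - i]) % mod
--         b[k] = (-accum * inv_a0) % mod
--
--     return b
-- ===== SOURCE B (Python) =====
-- from typing import List, Sequence
--
--
-- def poly_inv_naive_mod(a: Sequence[int], n: int, mod: int) -> List[int]: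
--     """Power-series inverse via synthetic long division of 1 by a.
--
--     Instead of the coefficient recurrence, keep a running remainder of
--     1 - a * (partial output); each step emits one quotient coefficient and
--     subtracts that multiple of a from the remainder.
--     """
--     if n <= 0:
--         return []
--     if not a:
--         raise ValueError("input polynomial must be non-empty")
--
--     a_norm = [int(c) % mod for c in a]
--     if a_norm[0] == 0:
--         raise ValueError("constant term is not invertible modulo mod")
--
--     inv_a0 = pow(a_norm[0], -1, mod)
--
--     rem = [0] * n
--     rem[0] = 1 % mod
--     out = []
--     for k in range(n):
--         c = rem[k] * inv_a0 % mod
--         out.append(c)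
--         for j in range(k + 1, min(n, k + len(a_norm))):
--             rem[j] = (rem[j] - c * a_norm[j - k]) % mod
--     return out
-- ===== Notes on version B (the rewrite author's own statement) =====
-- stated objective: alternative
-- what changed: A computes each coefficient by the O(n^2) convolution recurrence over already-produced coefficients; B instead performs synthetic long division of 1 by a, maintaining a running remainder polynomial from which each quotient coefficient is peeled off and the corresponding multiple of a subtracted.
import Mathlib
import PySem

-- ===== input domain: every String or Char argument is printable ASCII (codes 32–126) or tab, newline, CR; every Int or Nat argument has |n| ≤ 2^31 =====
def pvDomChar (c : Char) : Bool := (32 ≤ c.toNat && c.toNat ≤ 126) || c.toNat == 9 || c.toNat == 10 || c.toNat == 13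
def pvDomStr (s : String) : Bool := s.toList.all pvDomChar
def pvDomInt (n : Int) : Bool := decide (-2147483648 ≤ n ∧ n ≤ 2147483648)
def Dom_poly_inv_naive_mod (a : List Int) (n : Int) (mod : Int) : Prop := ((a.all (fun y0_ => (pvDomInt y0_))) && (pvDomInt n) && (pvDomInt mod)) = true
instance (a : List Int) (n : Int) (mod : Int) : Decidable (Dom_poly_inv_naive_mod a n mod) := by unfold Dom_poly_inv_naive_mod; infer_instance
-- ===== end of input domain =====

-- B replaces A's coefficient recurrence by synthetic long division of 1 by a
-- (a running remainder from which each quotient coefficient is peeled off);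
-- same asymptotic cost, a genuinely different algorithmic state (objective: alternative).

-- ===== PORT A =====
-- exact port of Python's pow(x, -1, m) for gcd(x, m) = 1 (guaranteed by Pre_):
-- the Bezout coefficient of extended gcd, reduced by Python's % sign convention.
def pyInvMod (x m : Int) : Int := PySem.Int.mod (Int.gcdA x m) m

def poly_inv_naive_mod (a : List Int) (n : Int) (mod : Int) : List Int :=
  if n ≤ 0 then []
  else if a = [] then []  -- Python raises ValueError here (outside Pre_)
  else
    let a_norm := a.map (fun c => PySem.Int.mod c mod)
    if a_norm.headI = 0 then []  -- Python raises ValueError here (outside Pre_)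
    else
      let inv_a0 := pyInvMod a_norm.headI mod
      let b0 := (List.replicate n.toNat 0).set 0 inv_a0
      (PySem.List.pyRange 1 n).foldl (fun b k =>
        let upper := min k ((a_norm.length : Int) - 1)
        let accum := (PySem.List.pyRange 1 (upper + 1)).foldl
          (fun accum i =>
            PySem.Int.mod (accum + PySem.List.pyGetD a_norm i 0 * PySem.List.pyGetD b (k - i) 0) mod) 0
        b.set k.toNat (PySem.Int.mod (-accum * inv_a0) mod)) b0

-- ===== PORT B =====
def poly_inv_naive_mod_alt (a : List Int) (n : Int) (mod : Int) : List Int :=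
  if n ≤ 0 then []
  else if a = [] then []  -- Source B raises ValueError here (outside Pre_)
  else
    let a_norm := a.map (fun c => PySem.Int.mod c mod)
    if a_norm.headI = 0 then []  -- Source B raises ValueError here (outside Pre_)
    else
      let inv_a0 := pyInvMod a_norm.headI mod
      let rem0 := (List.replicate n.toNat 0).set 0 (PySem.Int.mod 1 mod)
      ((PySem.List.pyRange 0 n).foldl (fun s k =>
        let c := PySem.Int.mod (PySem.List.pyGetD s.2 k 0 * inv_a0) mod
        let rem := (PySem.List.pyRange (k + 1) (min n (k + (a_norm.length : Int)))).foldl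
          (fun rem j =>
            rem.set j.toNat
              (PySem.Int.mod (PySem.List.pyGetD rem j 0 - c * PySem.List.pyGetD a_norm (j - k) 0) mod)) s.2
        (s.1 ++ [c], rem)) (([] : List Int), rem0)).1

-- ===== PRECONDITION & SPEC =====
-- Pre_ excludes exactly the inputs where Python A raises (for n > 0): an empty a
-- (ValueError), mod = 0 (ZeroDivisionError in the % normalization), and a constant
-- term not invertible modulo mod (ValueError from pow; mod = ±1 makes every
-- normalized constant term 0 and also raises).
def Pre_poly_inv_naive_mod (a : List Int) (n : Int) (mod : Int) : Prop :=
  n ≤ 0 ∨ (a ≠ [] ∧ 1 < mod.natAbs ∧ Int.gcd a.headI mod = 1)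
instance (a : List Int) (n : Int) (mod : Int) : Decidable (Pre_poly_inv_naive_mod a n mod) := by
  unfold Pre_poly_inv_naive_mod; infer_instance

def pvWitness_poly_inv_naive_mod : List Int × Int × Int := ([1, 1], 3, 2)

def Spec_poly_inv_naive_mod (a : List Int) (n : Int) (mod : Int) (out : List Int) : Prop := out = poly_inv_naive_mod_alt a n mod
instance (a : List Int) (n : Int) (mod : Int) (out : List Int) : Decidable (Spec_poly_inv_naive_mod a n mod out) := by unfold Spec_poly_inv_naive_mod; infer_instance

-- ===== CLAIM (what is proved, stated in full; the proofs are below) =====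
def Claim_equal_poly_inv_naive_mod : Prop := ∀ (a : List Int) (n : Int) (mod : Int), Dom_poly_inv_naive_mod a n mod → Pre_poly_inv_naive_mod a n mod → Spec_poly_inv_naive_mod a n mod (poly_inv_naive_mod a n mod)

-- ===== LEMMAS AND PROOFS =====

def coefList (aN : List Int) (inv m : Int) : Nat → List Int
  | 0 => []
  | (k+1) =>
    let prev := coefList aN inv m k
    prev ++ [if k = 0 then inv else
      PySem.Int.mod (-(∑ i ∈ Finset.range k, aN.getD (i + 1) 0 * prev.getD (k - 1 - i) 0) * inv) m]

def coef (aN : List Int) (inv m : Int) (k : Nat) : Int := (coefList aN inv m (k + 1)).getD k 0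

lemma coefList_length (aN : List Int) (inv m : Int) (t : Nat) : (coefList aN inv m t).length = t := by
  induction t with
  | zero => rfl
  | succ k ih => simp [coefList, ih]

lemma coefList_succ (aN : List Int) (inv m : Int) (t : Nat) :
    coefList aN inv m (t + 1) = coefList aN inv m t ++ [coef aN inv m t] := by
  conv_lhs => rw [coefList]
  rw [coef]
  conv_rhs => rw [coefList]
  simp [coefList_length]

lemma coefList_getD (aN : List Int) (inv m : Int) (t j : Nat) (h : j < t) :
    (coefList aN inv m t).getD j 0 = coef aN inv m j := by
  induction t with
  | zero => omega
  | succ k ih =>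
    rw [coefList_succ]
    rcases Nat.lt_or_ge j k with hj | hj
    · rw [List.getD_append _ _ _ _ (by simp [coefList_length, hj]), ih hj]
    · have : j = k := by omega
      subst this
      simp [coefList_length]

lemma coef_zero (aN : List Int) (inv m : Int) : coef aN inv m 0 = inv := by
  simp [coef, coefList]

lemma coef_succ (aN : List Int) (inv m : Int) (k : Nat) :
    coef aN inv m (k + 1) =
      PySem.Int.mod (-(∑ i ∈ Finset.range (k + 1),
        aN.getD (i + 1) 0 * coef aN inv m (k - i)) * inv) m := by
  rw [coef]
  conv_lhs => rw [coefList]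
  rw [List.getD_append_right _ _ _ _ (by simp [coefList_length])]
  simp only [coefList_length, Nat.sub_self, List.getD_cons_zero]
  rw [if_neg (by omega)]
  congr 2
  rw [Nat.add_sub_cancel]
  congr 1
  apply Finset.sum_congr rfl
  intro i hi
  rw [coefList_getD _ _ _ _ _ (by simp at hi; omega)]

lemma pymod_congr {a b m : Int} (h : a % m = b % m) : PySem.Int.mod a m = PySem.Int.mod b m := by
  show Int.fmod a m = Int.fmod b m
  rw [Int.fmod_eq_fmod_iff_fmod_sub_eq_zero]
  have hd : m ∣ a - b := Int.ModEq.dvd (Int.ModEq.symm h)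
  exact (PySem.Int.mod_eq_zero_iff_dvd _ _).2 hd

lemma pymod_emod (a m : Int) : (PySem.Int.mod a m) % m = a % m := by
  show (Int.fmod a m) % m = a % m
  rw [Int.fmod_eq_emod]
  split_ifs <;> simp [Int.emod_emod_of_dvd]

lemma pymod_idem (a m : Int) : PySem.Int.mod (PySem.Int.mod a m) m = PySem.Int.mod a m := by
  exact pymod_congr (pymod_emod a m)

lemma modfold_emod (m : Int) (f : Int → Int) (l : List Int) (acc : Int) :
    (l.foldl (fun acc i => PySem.Int.mod (acc + f i) m) acc) % m = (acc + (l.map f).sum) % m := by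
  induction l generalizing acc with
  | nil => simp
  | cons x xs ih =>
    simp only [List.foldl_cons, List.map_cons, List.sum_cons]
    rw [ih]
    conv_lhs => rw [Int.add_emod, pymod_emod, ← Int.add_emod]
    ring_nf

lemma pyrange_sum (f : Int → Int) (k : Nat) :
    (((PySem.List.pyRange 1 ((k : Int) + 1)).map f).sum) = ∑ i ∈ Finset.range k, f ((i : Int) + 1) := by
  induction k with
  | zero => simp [PySem.List.pyRange]
  | succ t ih =>
    rw [Finset.sum_range_succ, ← ih]
    push_cast
    rw [PySem.List.pyRange_one_succ_right (by omega)]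
    simp

-- ===== A-side loop =====

lemma coef_ms (aN : List Int) (inv m : Int) (t : Nat) (h1 : 1 ≤ t) (x : Int)
    (hx : x % m = (∑ i ∈ Finset.range t, aN.getD (i + 1) 0 * coef aN inv m (t - 1 - i)) % m) :
    PySem.Int.mod (-x * inv) m = coef aN inv m t := by
  obtain ⟨k, rfl⟩ : ∃ k, t = k + 1 := ⟨t - 1, by omega⟩
  rw [coef_succ]
  apply pymod_congr
  have h : Int.ModEq m x (∑ i ∈ Finset.range (k + 1), aN.getD (i + 1) 0 * coef aN inv m (k - i)) := by
    simpa [Int.ModEq] using hx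
  exact Int.ModEq.mul_right inv (Int.ModEq.neg h)

lemma accum_eval (aN : List Int) (inv m : Int) (N t : Nat) (hL : 1 ≤ aN.length)
    (b : List Int) (hb : b = coefList aN inv m t ++ List.replicate (N - t) 0) :
    ((PySem.List.pyRange 1 (min (t : Int) ((aN.length : Int) - 1) + 1)).foldl
       (fun accum i => PySem.Int.mod (accum + PySem.List.pyGetD aN i 0 * PySem.List.pyGetD b ((t : Int) - i) 0) m) 0) % m
    = (∑ i ∈ Finset.range t, aN.getD (i + 1) 0 * coef aN inv m (t - 1 - i)) % m := by
  set L := aN.length with hLdef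
  set uN : Nat := min t (L - 1) with huN
  have hucast : (min (t : Int) ((L : Int) - 1)) = (uN : Int) := by omega
  rw [hucast, modfold_emod, pyrange_sum]
  have hterm : ∀ i ∈ Finset.range uN,
      (fun j : Int => PySem.List.pyGetD aN j 0 * PySem.List.pyGetD b ((t : Int) - j) 0) ((i : Int) + 1)
      = aN.getD (i + 1) 0 * coef aN inv m (t - 1 - i) := by
    intro i hi
    simp only [Finset.mem_range] at hi
    have hit : i < t := lt_of_lt_of_le hi (huN ▸ Nat.min_le_left _ _)
    have h1' : ((i : Int) + 1) = ((i + 1 : Nat) : Int) := by push_cast; ring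
    beta_reduce
    have h2' : ((t : Int) - ((i + 1 : Nat) : Int)) = ((t - 1 - i : Nat) : Int) := by push_cast; omega
    rw [h1', h2', PySem.List.pyGetD_natCast, PySem.List.pyGetD_natCast, hb,
      List.getD_append _ _ _ _ (by rw [coefList_length]; omega),
      coefList_getD _ _ _ _ _ (by omega)]
  rw [Finset.sum_congr rfl hterm, zero_add]
  congr 1
  apply Finset.sum_subset
  · intro x hx
    simp only [Finset.mem_range] at hx ⊢
    have huN2 : uN = min t (L - 1) := huN
    omega
  · intro i hi hni
    simp only [Finset.mem_range] at hi hni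
    have huN2 : uN = min t (L - 1) := huN
    have hLi : L ≤ i + 1 := by
      rcases Nat.le_total t (L - 1) with hc | hc
      · rw [Nat.min_eq_left hc] at huN2; omega
      · rw [Nat.min_eq_right hc] at huN2; omega
    rw [List.getD_eq_default _ _ (by omega), zero_mul]

lemma stepA_eval (aN : List Int) (inv m : Int) (N t : Nat) (hL : 1 ≤ aN.length) (h1 : 1 ≤ t) (ht : t < N)
    (b : List Int) (hb : b = coefList aN inv m t ++ List.replicate (N - t) 0) :
    b.set (t : Int).toNat
      (PySem.Int.mod
        (-((PySem.List.pyRange 1 (min (t : Int) ((aN.length : Int) - 1) + 1)).foldl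
            (fun accum i => PySem.Int.mod (accum + PySem.List.pyGetD aN i 0 * PySem.List.pyGetD b ((t : Int) - i) 0) m) 0) * inv) m)
    = coefList aN inv m (t + 1) ++ List.replicate (N - (t + 1)) 0 := by
  rw [coef_ms aN inv m t h1 _ (accum_eval aN inv m N t hL b hb)]
  rw [hb, Int.toNat_natCast,
    List.set_append_right _ _ (by rw [coefList_length]),
    coefList_length, Nat.sub_self]
  obtain ⟨s, hs⟩ : ∃ s, N - t = s + 1 := ⟨N - t - 1, by omega⟩
  rw [hs, List.replicate_succ, List.set_cons_zero, coefList_succ]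
  simp
  omega

lemma pyRange_nil {a b : Int} (h : b ≤ a) : PySem.List.pyRange a b = [] := by
  simp [PySem.List.pyRange]; omega

def stepA (aN : List Int) (inv m : Int) : List Int → Int → List Int := fun b k =>
  b.set k.toNat
    (PySem.Int.mod
      (-((PySem.List.pyRange 1 (min k ((aN.length : Int) - 1) + 1)).foldl
          (fun accum i => PySem.Int.mod (accum + PySem.List.pyGetD aN i 0 * PySem.List.pyGetD b (k - i) 0) m) 0) * inv) m)

lemma A_loop (aN : List Int) (inv m : Int) (hL : 1 ≤ aN.length) (N : Nat) :
    ∀ (d t : Nat), 1 ≤ t → t ≤ N → N - t = d →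
    (PySem.List.pyRange (t : Int) (N : Int)).foldl (stepA aN inv m)
      (coefList aN inv m t ++ List.replicate (N - t) 0) = coefList aN inv m N := by
  intro d
  induction d with
  | zero =>
    intro t h1 htN hd
    have ht : t = N := by omega
    subst ht
    rw [pyRange_nil (by omega), List.foldl_nil]
    simp
  | succ d ih =>
    intro t h1 htN hd
    have ht : t < N := by omega
    rw [PySem.List.pyRange_one_cons (by exact_mod_cast Nat.cast_lt.2 ht), List.foldl_cons]
    have hstep : stepA aN inv m (coefList aN inv m t ++ List.replicate (N - t) 0) (t : Int)
        = coefList aN inv m (t + 1) ++ List.replicate (N - (t + 1)) 0 :=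
      stepA_eval aN inv m N t hL h1 ht _ rfl
    rw [hstep]
    have := ih (t + 1) (by omega) (by omega) (by omega)
    exact_mod_cast this

-- ===== B-side loop =====

lemma B_inner (aN : List Int) (c m k : Int) :
    ∀ (d : Nat) (lo hi : Int), 0 ≤ lo → (hi - lo).toNat = d → ∀ (r : List Int),
    ((PySem.List.pyRange lo hi).foldl
        (fun rem j =>
          rem.set j.toNat (PySem.Int.mod (PySem.List.pyGetD rem j 0 - c * PySem.List.pyGetD aN (j - k) 0) m)) r).length
      = r.length
    ∧ ∀ p : Nat, p < r.length →
      ((PySem.List.pyRange lo hi).foldl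
        (fun rem j =>
          rem.set j.toNat (PySem.Int.mod (PySem.List.pyGetD rem j 0 - c * PySem.List.pyGetD aN (j - k) 0) m)) r).getD p 0
      = if lo ≤ (p : Int) ∧ (p : Int) < hi
          then PySem.Int.mod (r.getD p 0 - c * PySem.List.pyGetD aN ((p : Int) - k) 0) m
          else r.getD p 0 := by
  intro d
  induction d with
  | zero =>
    intro lo hi hlo hd r
    rw [pyRange_nil (by omega), List.foldl_nil]
    refine ⟨rfl, fun p hp => ?_⟩
    rw [if_neg (by omega)]
  | succ d ih =>
    intro lo hi hlo hd r
    have hlt : lo < hi := by omega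
    rw [PySem.List.pyRange_one_cons hlt, List.foldl_cons]
    set v := PySem.Int.mod (PySem.List.pyGetD r lo 0 - c * PySem.List.pyGetD aN (lo - k) 0) m with hv
    obtain ⟨ihlen, ihget⟩ := ih (lo + 1) hi (by omega) (by omega) (r.set lo.toNat v)
    refine ⟨by rw [ihlen, List.length_set], fun p hp => ?_⟩
    rw [ihget p (by rw [List.length_set]; exact hp)]
    by_cases hpl : (p : Int) = lo
    · rw [if_neg (by omega), if_pos (by omega)]
      have hplo : lo.toNat = p := by omega
      rw [List.getD_eq_getElem?_getD, hplo, List.getElem?_set_self (by omega), Option.getD_some, hv,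
        ← hpl, PySem.List.pyGetD_natCast, List.getD_eq_getElem?_getD]
    · have hne : lo.toNat ≠ p := by omega
      have hset : (r.set lo.toNat v).getD p 0 = r.getD p 0 := by
        simp [List.getD_eq_getElem?_getD, List.getElem?_set_ne hne]
      rw [hset]
      by_cases hgt : lo + 1 ≤ (p : Int)
      · by_cases hhi : (p : Int) < hi
        · rw [if_pos ⟨by omega, hhi⟩, if_pos ⟨by omega, hhi⟩]
        · rw [if_neg (by omega), if_neg (by omega)]
      · rw [if_neg (by omega), if_neg (by omega)]

def Rres (aN : List Int) (inv m : Int) (k j : Nat) : Int :=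
  (if j = 0 then 1 else 0) - ∑ i ∈ Finset.range k, coef aN inv m i * aN.getD (j - i) 0

lemma c_eval (aN : List Int) (inv m : Int) (hinv : PySem.Int.mod inv m = inv) (k : Nat) (x : Int)
    (hx : x % m = Rres aN inv m k k % m) : PySem.Int.mod (x * inv) m = coef aN inv m k := by
  have hc : PySem.Int.mod (x * inv) m = PySem.Int.mod (Rres aN inv m k k * inv) m :=
    pymod_congr (Int.ModEq.mul_right inv hx)
  rw [hc]
  rcases Nat.eq_zero_or_pos k with hk | hk
  · subst hk
    simp only [Rres, Finset.range_zero, Finset.sum_empty, sub_zero, if_true]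
    norm_num
    rw [hinv, coef_zero]
  · obtain ⟨k', rfl⟩ : ∃ k', k = k' + 1 := ⟨k - 1, by omega⟩
    rw [coef_succ]
    congr 1
    rw [Rres, if_neg (by omega), zero_sub, neg_mul, neg_mul]
    congr 2
    rw [← Finset.sum_range_reflect (fun i => coef aN inv m i * aN.getD (k' + 1 - i) 0) (k' + 1)]
    apply Finset.sum_congr rfl
    intro i hi
    simp only [Finset.mem_range] at hi
    have h1 : k' + 1 - 1 - i = k' - i := by omega
    have h2 : k' + 1 - (k' - i) = i + 1 := by omega
    rw [h1, h2, mul_comm]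

lemma Rres_succ (aN : List Int) (inv m : Int) (k j : Nat) :
    Rres aN inv m (k + 1) j = Rres aN inv m k j - coef aN inv m k * aN.getD (j - k) 0 := by
  rw [Rres, Rres, Finset.sum_range_succ]
  ring

def stepB (aN : List Int) (inv m nI : Int) : (List Int × List Int) → Int → (List Int × List Int) := fun s kk =>
  (s.1 ++ [PySem.Int.mod (PySem.List.pyGetD s.2 kk 0 * inv) m],
   (PySem.List.pyRange (kk + 1) (min nI (kk + (aN.length : Int)))).foldl
     (fun rem j =>
       rem.set j.toNat
         (PySem.Int.mod
           (PySem.List.pyGetD rem j 0 -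
             PySem.Int.mod (PySem.List.pyGetD s.2 kk 0 * inv) m * PySem.List.pyGetD aN (j - kk) 0) m)) s.2)

lemma B_loop (aN : List Int) (inv m : Int) (hinv : PySem.Int.mod inv m = inv) (N : Nat) :
    ∀ (d k : Nat), k ≤ N → N - k = d → ∀ (out rem : List Int),
    out = coefList aN inv m k → rem.length = N →
    (∀ j : Nat, k ≤ j → j < N → rem.getD j 0 % m = Rres aN inv m k j % m) →
    ((PySem.List.pyRange (k : Int) (N : Int)).foldl (stepB aN inv m (N : Int)) (out, rem)).1
      = coefList aN inv m N := by
  intro d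
  induction d with
  | zero =>
    intro k hkN hd out rem hout hlen hrem
    have hk : k = N := by omega
    subst hk
    rw [pyRange_nil (by omega), List.foldl_nil, hout]
  | succ d ih =>
    intro k hkN hd out rem hout hlen hrem
    have hk : k < N := by omega
    rw [PySem.List.pyRange_one_cons (by exact_mod_cast Nat.cast_lt.2 hk), List.foldl_cons]
    -- the emitted coefficient is coef k
    have hc : PySem.Int.mod (PySem.List.pyGetD rem (k : Int) 0 * inv) m = coef aN inv m k := by
      rw [PySem.List.pyGetD_natCast]
      exact c_eval aN inv m hinv k _ (hrem k le_rfl hk)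
    -- the inner fold, described pointwise
    obtain ⟨hlen', hget'⟩ := B_inner aN (coef aN inv m k) m (k : Int)
      ((min (N : Int) ((k : Int) + (aN.length : Int)) - ((k : Int) + 1)).toNat)
      ((k : Int) + 1) (min (N : Int) ((k : Int) + (aN.length : Int))) (by omega) rfl rem
    have hstep : stepB aN inv m (N : Int) (out, rem) (k : Int)
        = (coefList aN inv m (k + 1),
           (PySem.List.pyRange ((k : Int) + 1) (min (N : Int) ((k : Int) + (aN.length : Int)))).foldl
             (fun r j =>
               r.set j.toNat
                 (PySem.Int.mod (PySem.List.pyGetD r j 0 - coef aN inv m k * PySem.List.pyGetD aN (j - (k : Int)) 0) m)) rem) := by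
      simp only [stepB, hc, hout, ← coefList_succ]
    rw [hstep]
    apply ih (k + 1) (by omega) (by omega) _ _ rfl (by rw [hlen']; exact hlen)
    intro j hkj hjN
    rw [hget' j (by omega)]
    by_cases hcase : (j : Int) < min (N : Int) ((k : Int) + (aN.length : Int))
    · rw [if_pos ⟨by omega, hcase⟩]
      have haj : PySem.List.pyGetD aN ((j : Int) - (k : Int)) 0 = aN.getD (j - k) 0 := by
        have : ((j : Int) - (k : Int)) = ((j - k : Nat) : Int) := by omega
        rw [this, PySem.List.pyGetD_natCast]
      rw [pymod_emod, haj, Rres_succ]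
      exact Int.ModEq.sub (hrem j (by omega) hjN) (Int.ModEq.refl _)
    · rw [if_neg (by omega)]
      have haj : aN.getD (j - k) 0 = 0 := List.getD_eq_default _ _ (by omega)
      rw [Rres_succ, haj, mul_zero, sub_zero]
      exact hrem j (by omega) hjN

lemma AB_agree (a : List Int) (n : Int) (m : Int)
    (hne : a ≠ []) (hm : 1 < m.natAbs) (hg : Int.gcd a.headI m = 1) (hn : ¬ n ≤ 0) :
    poly_inv_naive_mod a n m = poly_inv_naive_mod_alt a n m := by
  set aN := a.map (fun c => PySem.Int.mod c m) with haN
  have hLa : 1 ≤ aN.length := by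
    rcases a with _ | ⟨h, t⟩
    · exact absurd rfl hne
    · simp [haN]
  have hhead : aN.headI = PySem.Int.mod a.headI m := by
    rcases a with _ | ⟨h, t⟩
    · exact absurd rfl hne
    · simp [haN]
  have h0 : aN.headI ≠ 0 := by
    rw [hhead]
    intro hz
    have hdvd : m ∣ a.headI := (PySem.Int.mod_eq_zero_iff_dvd _ _).1 hz
    have hd2 : m.natAbs ∣ Int.gcd a.headI m := Nat.dvd_gcd (Int.natAbs_dvd_natAbs.2 hdvd) dvd_rfl
    rw [hg] at hd2
    have := Nat.le_of_dvd one_pos hd2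
    omega
  set inv := pyInvMod aN.headI m with hinvdef
  have hinv : PySem.Int.mod inv m = inv := by
    rw [hinvdef, pyInvMod, pymod_idem]
  set N := n.toNat with hN
  have hN1 : 1 ≤ N := by omega
  have hnN : n = (N : Int) := by omega
  -- A side
  have hA : poly_inv_naive_mod a n m = coefList aN inv m N := by
    rw [poly_inv_naive_mod, if_neg hn, if_neg hne]
    simp only [← haN]
    rw [if_neg h0]
    show (PySem.List.pyRange 1 n).foldl (stepA aN inv m) ((List.replicate n.toNat 0).set 0 inv) = _
    have hb0 : (List.replicate n.toNat 0).set 0 inv = coefList aN inv m 1 ++ List.replicate (N - 1) 0 := by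
      rw [← hN]
      obtain ⟨s, hs⟩ : ∃ s, N = s + 1 := ⟨N - 1, by omega⟩
      rw [hs, List.replicate_succ, List.set_cons_zero]
      simp [coefList]
    rw [hb0, hnN]
    exact_mod_cast A_loop aN inv m hLa N (N - 1) 1 le_rfl hN1 rfl
  -- B side
  have hB : poly_inv_naive_mod_alt a n m = coefList aN inv m N := by
    rw [poly_inv_naive_mod_alt, if_neg hn, if_neg hne]
    simp only [← haN]
    rw [if_neg h0]
    show ((PySem.List.pyRange 0 n).foldl (stepB aN inv m n) (([] : List Int), (List.replicate n.toNat 0).set 0 (PySem.Int.mod 1 m))).1 = _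
    rw [hnN, Int.toNat_natCast]
    have hrem0len : ((List.replicate N 0).set 0 (PySem.Int.mod 1 m)).length = N := by
      simp
    apply B_loop aN inv m hinv N N 0 (by omega) (by omega) _ _ (by simp [coefList]) hrem0len
    intro j hj0 hjN
    obtain ⟨s, hs⟩ : ∃ s, N = s + 1 := ⟨N - 1, by omega⟩
    rw [hs, List.replicate_succ, List.set_cons_zero]
    rcases Nat.eq_zero_or_pos j with hj | hj
    · subst hj
      simp only [List.getD_cons_zero, Rres, Finset.range_zero, Finset.sum_empty, if_true, sub_zero]
      exact pymod_emod 1 m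
    · obtain ⟨j', hj'⟩ : ∃ j', j = j' + 1 := ⟨j - 1, by omega⟩
      subst hj'
      simp only [List.getD_cons_succ, Rres, Finset.range_zero, Finset.sum_empty, if_neg (by omega : ¬ (j' + 1 = 0)), sub_zero]
      simp
  rw [hA, hB]

-- ===== VERDICT (by name: the statement is the Claim_ definition above) =====
theorem poly_inv_naive_mod_spec : Claim_equal_poly_inv_naive_mod := by
  intro a n mod hdom hpre
  unfold Spec_poly_inv_naive_mod
  by_cases hn : n ≤ 0
  · rw [poly_inv_naive_mod, poly_inv_naive_mod_alt, if_pos hn, if_pos hn]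
  · rcases hpre with hle | ⟨hne, hm, hg⟩
    · exact absurd hle hn
    · exact AB_agree a n mod hne hm hg hn
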